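-- pv_equiv track=rewrite | github.com/voxie-viewer/voxie | filters/AnalyzeCompressedJpegVolume.py | get_overall_value_length
-- ===== SOURCE A (Python) =====
-- def get_overall_value_length(counters):
--     res = 0
--     for symb, count in enumerate(counters):
--         if count == 0:
--             continue
--         value_len = symb & 0x0f
--         res += int(count) * value_len
--     return res
-- ===== SOURCE B (Python) =====
-- def get_overall_value_length(counters):
--     totals = [0] * 16
--     for symb, count in enumerate(counters):
--         totals[symb & 0x0f] += int(count)
--     return sum(v * totals[v] for v in range(16))
-- ===== Notes on version B (the rewrite author's own statement) =====
-- stated objective: alternative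
-- what changed: B groups counts into a 16-bucket table indexed by the low nibble in one pass, then computes the weighted sum over the 16 value lengths in a second pass, instead of A's single fused accumulation with a zero-skip branch.
import Mathlib
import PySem

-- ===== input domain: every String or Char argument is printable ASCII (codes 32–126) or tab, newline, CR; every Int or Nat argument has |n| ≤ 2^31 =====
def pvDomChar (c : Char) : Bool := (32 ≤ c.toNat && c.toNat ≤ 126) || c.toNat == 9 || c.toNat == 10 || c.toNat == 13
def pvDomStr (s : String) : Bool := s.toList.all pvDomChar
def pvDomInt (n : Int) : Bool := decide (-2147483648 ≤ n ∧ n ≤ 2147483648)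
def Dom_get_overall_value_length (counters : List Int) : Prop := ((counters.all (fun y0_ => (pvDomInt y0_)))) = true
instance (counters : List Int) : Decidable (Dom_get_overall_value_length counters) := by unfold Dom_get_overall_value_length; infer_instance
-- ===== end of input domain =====

-- B replaces A's single fused accumulation by a 16-bucket group-by on the low nibble
-- followed by a separate weighted-sum pass (alternative decomposition, same cost).

-- ===== PORT A =====
def get_overall_value_length (counters : List Int) : Int :=
  (PySem.List.enumerate counters).foldl
    (fun res p =>
      if p.2 = 0 then res
      else res + p.2 * (PySem.Int.band p.1 15)) 0

-- ===== PORT B =====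
def get_overall_value_length_alt (counters : List Int) : Int :=
  let totals := (PySem.List.enumerate counters).foldl
    (fun t p =>
      PySem.List.pySetD t (PySem.Int.band p.1 15)
        (PySem.List.pyGetD t (PySem.Int.band p.1 15) 0 + p.2))
    (List.replicate 16 (0 : Int))
  (PySem.List.pyRange 0 16 1).foldl (fun acc v => acc + v * PySem.List.pyGetD totals v 0) 0

-- ===== PRECONDITION & SPEC =====
def Spec_get_overall_value_length (counters : List Int) (out : Int) : Prop := out = get_overall_value_length_alt counters
instance (counters : List Int) (out : Int) : Decidable (Spec_get_overall_value_length counters out) := by unfold Spec_get_overall_value_length; infer_instance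

-- ===== CLAIM (what is proved, stated in full; the proofs are below) =====
def Claim_equal_get_overall_value_length : Prop := ∀ (counters : List Int), Dom_get_overall_value_length counters → Spec_get_overall_value_length counters (get_overall_value_length counters)

-- ===== LEMMAS AND PROOFS =====

-- the second pass of B, as a function of the table
def pvFinalSum (t : List Int) : Int :=
  (PySem.List.pyRange 0 16 1).foldl (fun acc v => acc + v * PySem.List.pyGetD t v 0) 0

lemma pvBand15_nonneg (s : Int) (hs : 0 ≤ s) : 0 ≤ PySem.Int.band s 15 :=
  PySem.Int.band_nonneg_of_nonneg_left 15 hs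

lemma pvBand15_lt (s : Int) (hs : 0 ≤ s) : PySem.Int.band s 15 < 16 := by
  rw [PySem.Int.band_of_nonneg hs (by norm_num)]
  have : s.toNat &&& (15 : Int).toNat ≤ (15 : Int).toNat := Nat.and_le_right
  omega

-- bumping bucket j by c changes the weighted sum by j * c
lemma pvFinalSum_bump (t : List Int) (ht : t.length = 16) (j c : Int)
    (h0 : 0 ≤ j) (h1 : j < 16) :
    pvFinalSum (PySem.List.pySetD t j (PySem.List.pyGetD t j 0 + c)) =
      pvFinalSum t + j * c := by
  match t, ht with
  | [a0,a1,a2,a3,a4,a5,a6,a7,a8,a9,a10,a11,a12,a13,a14,a15], _ =>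
    interval_cases j <;>
      simp [pvFinalSum, PySem.List.pySetD, PySem.List.pySet?, PySem.List.pyGetD,
        PySem.List.pyIdx?, PySem.List.pyRange, PySem.List.pyGet?, List.range_succ] <;> ring

lemma pvFinalSum_fold (counters : List Int) : ∀ (s : Int), 0 ≤ s → ∀ (t : List Int), t.length = 16 →
    pvFinalSum ((PySem.List.enumerate counters s).foldl
      (fun t p =>
        PySem.List.pySetD t (PySem.Int.band p.1 15)
          (PySem.List.pyGetD t (PySem.Int.band p.1 15) 0 + p.2)) t) =
    (PySem.List.enumerate counters s).foldl
      (fun res p =>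
        if p.2 = 0 then res
        else res + p.2 * (PySem.Int.band p.1 15)) (pvFinalSum t) := by
  induction counters with
  | nil => intro s _ t _; simp [PySem.List.enumerate_nil]
  | cons c cs ih =>
    intro s hs t ht
    rw [PySem.List.enumerate_cons, List.foldl_cons, List.foldl_cons]
    have hlen : (PySem.List.pySetD t (PySem.Int.band s 15)
        (PySem.List.pyGetD t (PySem.Int.band s 15) 0 + c)).length = 16 := by
      rw [PySem.List.length_pySetD]; exact ht
    rw [ih (s+1) (by omega) _ hlen]
    congr 1
    rw [pvFinalSum_bump t ht _ c (pvBand15_nonneg s hs) (pvBand15_lt s hs)]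
    by_cases hc : c = 0
    · simp [hc]
    · simp [hc]; ring

-- ===== VERDICT (by name: the statement is the Claim_ definition above) =====
theorem get_overall_value_length_spec : Claim_equal_get_overall_value_length := by
  intro counters _
  unfold Spec_get_overall_value_length get_overall_value_length get_overall_value_length_alt
  have h := pvFinalSum_fold counters 0 (le_refl 0) (List.replicate 16 (0 : Int)) (by simp)
  have hz : pvFinalSum (List.replicate 16 (0 : Int)) = 0 := by decide
  rw [hz] at h
  simpa [pvFinalSum] using h.symm
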